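-- pv_equiv track=rewrite | github.com/ShakshamTaneja/For-openai | legal-voidlex-desktop copy/backend/main.py | merge_duplicate_keys
-- ===== SOURCE A (Python) =====
-- def merge_duplicate_keys(pairs):
--     res = {}
--     for k, v in pairs:
--         if k in res:
--             # If the duplicate key has a falsy or default value but we already have a rich value, keep the rich value!
--             if v in [None, "", "PENDING_DOCUMENT_GENERATION"] and res[k] not in [None, "", "PENDING_DOCUMENT_GENERATION"]:
--                 continue
--             # Overwrite if current value is empty/default
--             if res[k] in [None, "", "PENDING_DOCUMENT_GENERATION"]:
--                 res[k] = v
--             else: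
--                 res[k] = v
--         else:
--             res[k] = v
--     return res
-- ===== SOURCE B (Python) =====
-- def merge_duplicate_keys(pairs):
--     DEFAULTS = [None, "", "PENDING_DOCUMENT_GENERATION"]
--     last_val = {}
--     last_rich = {}
--     order = []
--     for k, v in pairs:
--         if k not in last_val:
--             order.append(k)
--         last_val[k] = v
--         if v not in DEFAULTS:
--             last_rich[k] = v
--     return {k: last_rich[k] if k in last_rich else last_val[k] for k in order}
-- ===== Notes on version B (the rewrite author's own statement) =====
-- stated objective: alternative
-- what changed: Replaced A's single fold with branch-heavy in-place dict updates by one pass building last_val, last_rich (updated only on non-default values) and a first-appearance order list, followed by a final comprehension picking last_rich over last_val per key.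
import Mathlib
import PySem

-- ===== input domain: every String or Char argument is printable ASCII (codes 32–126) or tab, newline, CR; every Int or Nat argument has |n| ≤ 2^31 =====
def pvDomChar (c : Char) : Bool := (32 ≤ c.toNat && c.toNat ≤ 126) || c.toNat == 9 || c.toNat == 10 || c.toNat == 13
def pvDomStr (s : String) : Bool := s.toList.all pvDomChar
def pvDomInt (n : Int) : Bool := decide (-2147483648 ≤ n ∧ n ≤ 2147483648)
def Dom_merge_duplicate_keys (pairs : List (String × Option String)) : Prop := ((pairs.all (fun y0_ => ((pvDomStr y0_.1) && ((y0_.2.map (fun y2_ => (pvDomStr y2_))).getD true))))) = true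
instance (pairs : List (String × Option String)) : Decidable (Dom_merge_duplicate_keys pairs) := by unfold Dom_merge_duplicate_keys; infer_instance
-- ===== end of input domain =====

-- B replaces A's branch-heavy in-place dict fold by a pass building last-value/last-rich dicts plus an order list, then a final pick per key (alternative decomposition, same cost).

-- ===== PORT A =====
def pvDefaults : List (Option String) := [none, some "", some "PENDING_DOCUMENT_GENERATION"]

def pvStepA (res : PySem.Dict String (Option String)) (kv : String × Option String) :
    PySem.Dict String (Option String) :=
  if res.contains kv.1 then
    if pvDefaults.contains kv.2 && !(pvDefaults.contains ((res.get? kv.1).getD none)) then res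
    else if pvDefaults.contains ((res.get? kv.1).getD none) then res.insert kv.1 kv.2
    else res.insert kv.1 kv.2
  else res.insert kv.1 kv.2

def merge_duplicate_keys (pairs : List (String × Option String)) : List (String × Option String) :=
  (pairs.foldl pvStepA PySem.Dict.empty).items

-- ===== PORT B =====
def pvStepB
    (st : PySem.Dict String (Option String) × PySem.Dict String (Option String) × List String)
    (kv : String × Option String) :
    PySem.Dict String (Option String) × PySem.Dict String (Option String) × List String :=
  let order := if st.1.contains kv.1 then st.2.2 else st.2.2 ++ [kv.1]
  let lv := st.1.insert kv.1 kv.2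
  let lr := if pvDefaults.contains kv.2 then st.2.1 else st.2.1.insert kv.1 kv.2
  (lv, lr, order)

def pvPick (lr lv : PySem.Dict String (Option String)) (k : String) : Option String :=
  match lr.get? k with
  | some r => r
  | none => (lv.get? k).getD none

def merge_duplicate_keys_alt (pairs : List (String × Option String)) : List (String × Option String) :=
  let st := pairs.foldl pvStepB (PySem.Dict.empty, PySem.Dict.empty, [])
  st.2.2.map (fun k => (k, pvPick st.2.1 st.1 k))

-- ===== PRECONDITION & SPEC =====
def Spec_merge_duplicate_keys (pairs : List (String × Option String)) (out : List (String × Option String)) : Prop := out = merge_duplicate_keys_alt pairs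
instance (pairs : List (String × Option String)) (out : List (String × Option String)) : Decidable (Spec_merge_duplicate_keys pairs out) := by unfold Spec_merge_duplicate_keys; infer_instance

-- ===== CLAIM (what is proved, stated in full; the proofs are below) =====
def Claim_equal_merge_duplicate_keys : Prop := ∀ (pairs : List (String × Option String)), Dom_merge_duplicate_keys pairs → Spec_merge_duplicate_keys pairs (merge_duplicate_keys pairs)

-- ===== LEMMAS AND PROOFS =====

theorem pick_insert_of_ne (lr lv : PySem.Dict String (Option String)) (k j : String) (v w : Option String)
    (hne : j ≠ k) :
    pvPick (lr.insert k v) (lv.insert k w) j = pvPick lr lv j := by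
  simp [pvPick, PySem.Dict.get?_insert_of_ne _ _ hne]

theorem pick_insert_lv_of_ne (lr lv : PySem.Dict String (Option String)) (k j : String) (w : Option String)
    (hne : j ≠ k) :
    pvPick lr (lv.insert k w) j = pvPick lr lv j := by
  simp [pvPick, PySem.Dict.get?_insert_of_ne _ _ hne]

theorem loop_invariant
    (l : List (String × Option String))
    (res lv lr : PySem.Dict String (Option String)) (order : List String)
    (h1 : res.items = order.map (fun k => (k, pvPick lr lv k)))
    (h3 : order.Nodup)
    (h4 : ∀ k, lv.contains k = true ↔ k ∈ order)
    (h5 : ∀ k r, lr.get? k = some r → pvDefaults.contains r = false)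
    (h6 : ∀ k v', lv.get? k = some v' → pvDefaults.contains v' = false → lr.get? k = some v')
    (h7 : ∀ k, (lr.get? k).isSome = true → lv.contains k = true) :
    (l.foldl pvStepA res).items =
      (l.foldl pvStepB (lv, lr, order)).2.2.map
        (fun k => (k, pvPick (l.foldl pvStepB (lv, lr, order)).2.1 (l.foldl pvStepB (lv, lr, order)).1 k)) := by
  induction l generalizing res lv lr order with
  | nil => simpa using h1
  | cons kv t ih =>
    obtain ⟨k, v⟩ := kv
    -- derived facts about res
    have hkeys : res.keys = order := by
      show res.items.map (·.1) = order
      rw [h1, List.map_map]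
      have hc : ((·.1) ∘ fun k => ((k, pvPick lr lv k) : String × Option String)) = id := rfl
      rw [hc, List.map_id]
    have hnodup : res.keys.Nodup := by rw [hkeys]; exact h3
    have hcontains : ∀ j, res.contains j = decide (j ∈ order) := by
      intro j
      rw [← hkeys, PySem.Dict.contains_eq_decide_mem_keys]
    have hget : ∀ j, j ∈ order → res.get? j = some (pvPick lr lv j) := by
      intro j hj
      exact PySem.Dict.get?_of_mem_items _ (by rw [h1]; exact List.mem_map.2 ⟨j, hj, rfl⟩) hnodup
    simp only [List.foldl_cons]
    by_cases hk : k ∈ order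
    · -- key already present
      have hck : res.contains k = true := by rw [hcontains]; simpa
      have hlvk : lv.contains k = true := (h4 k).2 hk
      have hgetk : res.get? k = some (pvPick lr lv k) := hget k hk
      have hlv_some : ∃ w, lv.get? k = some w := by
        rcases hw : lv.get? k with _ | w
        · exfalso
          have := PySem.Dict.get?_eq_none_iff_contains lv k
          rw [hw] at this
          simp [hlvk] at this
        · exact ⟨w, rfl⟩
      -- pvStepB components
      have hB : pvStepB (lv, lr, order) (k, v) =
          (lv.insert k v, if pvDefaults.contains v then lr else lr.insert k v, order) := by
        simp [pvStepB, hlvk]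
      rw [hB]
      -- new invariants shared by both subcases
      have H3 : order.Nodup := h3
      have H4 : ∀ j, (lv.insert k v).contains j = true ↔ j ∈ order := by
        intro j
        rw [PySem.Dict.contains_insert]
        by_cases hj : j = k
        · subst hj; simp [hk]
        · simp [hj, h4 j]
      have H5 : ∀ j r, (if pvDefaults.contains v then lr else lr.insert k v).get? j = some r →
          pvDefaults.contains r = false := by
        intro j r
        by_cases hd : pvDefaults.contains v = true
        · simp only [if_pos hd]; exact h5 j r
        · rw [if_neg hd]
          by_cases hj : j = k
          · subst hj
            rw [PySem.Dict.get?_insert_self]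
            intro hr; injection hr with hr; subst hr
            simpa using hd
          · rw [PySem.Dict.get?_insert_of_ne _ _ hj]; exact h5 j r
      have H6 : ∀ j v', (lv.insert k v).get? j = some v' → pvDefaults.contains v' = false →
          (if pvDefaults.contains v then lr else lr.insert k v).get? j = some v' := by
        intro j v'
        by_cases hj : j = k
        · subst hj
          rw [PySem.Dict.get?_insert_self]
          intro hv' hrich; injection hv' with hv'; subst hv'
          simp only [hrich, Bool.false_eq_true, if_false]
          exact PySem.Dict.get?_insert_self _ _ _
        · rw [PySem.Dict.get?_insert_of_ne _ _ hj]
          intro hv' hrich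
          by_cases hd : pvDefaults.contains v = true
          · simp only [hd, if_true]; exact h6 j v' hv' hrich
          · simp only [hd, Bool.false_eq_true, if_false]
            rw [PySem.Dict.get?_insert_of_ne _ _ hj]
            exact h6 j v' hv' hrich
      have H7 : ∀ j, ((if pvDefaults.contains v then lr else lr.insert k v).get? j).isSome = true →
          (lv.insert k v).contains j = true := by
        intro j
        by_cases hj : j = k
        · subst hj; intro _; exact PySem.Dict.contains_insert_self _ _ _
        · intro hs
          rw [PySem.Dict.contains_insert]
          have hlr : (lr.get? j).isSome = true := by
            rcases hd : pvDefaults.contains v with _ | _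
            · rw [if_neg (by rw [hd]; exact Bool.false_ne_true), PySem.Dict.get?_insert_of_ne _ _ hj] at hs
              exact hs
            · rw [if_pos hd] at hs
              exact hs
          simp [h7 j hlr]
      -- now H1, by case on the values
      apply ih _ _ _ _ ?_ H3 H4 H5 H6 H7
      by_cases hd : pvDefaults.contains v = true
      · by_cases hr : pvDefaults.contains (pvPick lr lv k) = true
        · -- v default, res[k] default: A overwrites with v
          have hd' : v ∈ pvDefaults := by simpa using hd
          have hr' : pvPick lr lv k ∈ pvDefaults := by simpa using hr
          have hstep : pvStepA res (k, v) = res.insert k v := by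
            simp [pvStepA, hck, hgetk, hd', hr']
          rw [hstep, PySem.Dict.items_insert_of_contains _ _ hck, h1, List.map_map]
          simp only [if_pos hd]
          apply List.map_congr_left
          intro j hj
          by_cases hjk : j = k
          · subst hjk
            have hlrk : lr.get? j = none := by
              rcases hl : lr.get? j with _ | r
              · rfl
              · exfalso
                have hpick : pvPick lr lv j = r := by simp [pvPick, hl]
                rw [hpick] at hr
                rw [h5 j r hl] at hr
                exact Bool.false_ne_true hr
            simp [pvPick, hlrk, PySem.Dict.get?_insert_self]
          · simp [hjk, pvPick, PySem.Dict.get?_insert_of_ne _ _ hjk]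
        · -- v default, res[k] rich: A keeps res
          have hd' : v ∈ pvDefaults := by simpa using hd
          have hr' : pvPick lr lv k ∉ pvDefaults := by simpa using hr
          have hstep : pvStepA res (k, v) = res := by
            simp [pvStepA, hck, hgetk, hd', hr']
          rw [hstep, h1]
          simp only [if_pos hd]
          apply List.map_congr_left
          intro j hj
          by_cases hjk : j = k
          · subst hjk
            obtain ⟨w, hw⟩ := hlv_some
            have hlrk : ∃ r, lr.get? j = some r := by
              rcases hl : lr.get? j with _ | r
              · exfalso
                have hpick : pvPick lr lv j = w := by simp [pvPick, hl, hw]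
                rw [hpick] at hr
                have := h6 j w hw (by simpa using hr)
                rw [hl] at this; simp at this
              · exact ⟨r, rfl⟩
            obtain ⟨r, hlr⟩ := hlrk
            simp [pvPick, hlr]
          · simp [hjk, pvPick, PySem.Dict.get?_insert_of_ne _ _ hjk]
      · -- v rich: A overwrites with v
        have hd' : v ∉ pvDefaults := by simpa using hd
        have hstep : pvStepA res (k, v) = res.insert k v := by
          simp [pvStepA, hck, hd']
        rw [hstep, PySem.Dict.items_insert_of_contains _ _ hck, h1, List.map_map]
        simp only [if_neg hd]
        apply List.map_congr_left
        intro j hj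
        by_cases hjk : j = k
        · subst hjk
          simp [pvPick, PySem.Dict.get?_insert_self]
        · simp [hjk, pvPick, PySem.Dict.get?_insert_of_ne _ _ hjk]
    · -- fresh key: appended
      have hck : res.contains k = false := by rw [hcontains]; simpa
      have hlvk : lv.contains k = false := by
        rcases hb : lv.contains k with _ | _
        · rfl
        · exact absurd ((h4 k).1 hb) hk
      have hlrk : lr.get? k = none := by
        rcases hl : lr.get? k with _ | r
        · rfl
        · exfalso
          have := h7 k (by simp [hl])
          rw [hlvk] at this; exact Bool.false_ne_true this
      have hB : pvStepB (lv, lr, order) (k, v) =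
          (lv.insert k v, if pvDefaults.contains v then lr else lr.insert k v, order ++ [k]) := by
        simp [pvStepB, hlvk]
      rw [hB]
      have hstep : pvStepA res (k, v) = res.insert k v := by
        simp [pvStepA, hck]
      rw [hstep]
      apply ih
      · -- H1
        rw [PySem.Dict.items_insert_of_not_contains _ _ hck, h1, List.map_append]
        by_cases hd : pvDefaults.contains v = true
        · simp only [if_pos hd]
          congr 1
          · apply List.map_congr_left
            intro j hj
            have hjk : j ≠ k := fun h => hk (h ▸ hj)
            rw [pick_insert_lv_of_ne _ _ _ _ _ hjk]
          · simp [pvPick, hlrk, PySem.Dict.get?_insert_self]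
        · simp only [if_neg hd]
          congr 1
          · apply List.map_congr_left
            intro j hj
            have hjk : j ≠ k := fun h => hk (h ▸ hj)
            rw [pick_insert_of_ne _ _ _ _ _ _ hjk]
          · simp [pvPick, PySem.Dict.get?_insert_self]
      · -- H3
        simp [List.nodup_append, h3, hk]
        intro a ha hak
        exact hk (hak ▸ ha)
      · -- H4
        intro j
        rw [PySem.Dict.contains_insert]
        by_cases hj : j = k
        · subst hj; simp
        · simp [hj, h4 j]
      · -- H5
        intro j r
        by_cases hd : pvDefaults.contains v = true
        · simp only [hd, if_true]; exact h5 j r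
        · simp only [hd, Bool.false_eq_true, if_false]
          by_cases hj : j = k
          · subst hj
            rw [PySem.Dict.get?_insert_self]
            intro hr; injection hr with hr; subst hr
            simpa using hd
          · rw [PySem.Dict.get?_insert_of_ne _ _ hj]; exact h5 j r
      · -- H6
        intro j v'
        by_cases hj : j = k
        · subst hj
          rw [PySem.Dict.get?_insert_self]
          intro hv' hrich; injection hv' with hv'; subst hv'
          simp only [hrich, Bool.false_eq_true, if_false]
          exact PySem.Dict.get?_insert_self _ _ _
        · rw [PySem.Dict.get?_insert_of_ne _ _ hj]
          intro hv' hrich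
          by_cases hd : pvDefaults.contains v = true
          · simp only [hd, if_true]; exact h6 j v' hv' hrich
          · simp only [hd, Bool.false_eq_true, if_false]
            rw [PySem.Dict.get?_insert_of_ne _ _ hj]
            exact h6 j v' hv' hrich
      · -- H7
        intro j
        by_cases hj : j = k
        · subst hj; intro _; exact PySem.Dict.contains_insert_self _ _ _
        · intro hs
          rw [PySem.Dict.contains_insert]
          have hlr : (lr.get? j).isSome = true := by
            rcases hd : pvDefaults.contains v with _ | _
            · rw [if_neg (by rw [hd]; exact Bool.false_ne_true), PySem.Dict.get?_insert_of_ne _ _ hj] at hs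
              exact hs
            · rw [if_pos hd] at hs
              exact hs
          simp [h7 j hlr]

theorem merge_duplicate_keys_spec : Claim_equal_merge_duplicate_keys := by
  intro pairs _
  unfold Spec_merge_duplicate_keys merge_duplicate_keys merge_duplicate_keys_alt
  exact loop_invariant pairs _ _ _ [] (by simp [PySem.Dict.empty]) (by simp)
    (by simp [PySem.Dict.contains_empty]) (by simp [PySem.Dict.get?_empty])
    (by simp [PySem.Dict.get?_empty]) (by simp [PySem.Dict.get?_empty])
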